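-- pv_equiv track=rewrite | github.com/velorientc/git_test7 | thgutil/hglib.py | _earlygetopt
-- ===== SOURCE A (Python) =====
-- def _earlygetopt(aliases, args):
--     """Return list of values for an option (or aliases).
--
--     The values are listed in the order they appear in args.
--     The options and values are removed from args.
--     """
--     try:
--         argcount = args.index("--")
--     except ValueError:
--         argcount = len(args)
--     shortopts = [opt for opt in aliases if len(opt) == 2]
--     values = []
--     pos = 0
--     while pos < argcount:
--         if args[pos] in aliases:
--             if pos + 1 >= argcount:
--                 # ignore and let getopt report an error if there is no value
--                 break
--             del args[pos]
--             values.append(args.pop(pos))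
--             argcount -= 2
--         elif args[pos][:2] in shortopts:
--             # short option can have no following space, e.g. hg log -Rfoo
--             values.append(args.pop(pos)[2:])
--             argcount -= 1
--         else:
--             pos += 1
--     return values
-- ===== SOURCE B (Python) =====
-- def _earlygetopt(aliases, args):
--     """Return list of values for an option (or aliases).
--
--     The values are listed in the order they appear in args.
--     The options and values are removed from args.
--     """
--     try:
--         cut = args.index("--")
--     except ValueError:
--         cut = len(args)
--     aliasset = set(aliases)
--     shortopts = set(opt for opt in aliases if len(opt) == 2)
--     head, tail = args[:cut], args[cut:]
--     values, kept = [], []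
--     i, n = 0, len(head)
--     while i < n:
--         a = head[i]
--         if a in aliasset:
--             if i + 1 >= n:
--                 # no value follows: stop, leave the rest for getopt to report
--                 kept.extend(head[i:])
--                 break
--             values.append(head[i + 1])
--             i += 2
--         elif a[:2] in shortopts:
--             values.append(a[2:])
--             i += 1
--         else:
--             kept.append(a)
--             i += 1
--     args[:] = kept + tail
--     return values
-- ===== Notes on version B (the rewrite author's own statement) =====
-- stated objective: faster
-- what changed: Replaces the quadratic while-loop that repeatedly del/pops elements out of args (each an O(n) shift) by a single left-to-right pass over the slice before '--' that builds the values and kept lists once and assigns args[:] = kept + tail.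
import Mathlib
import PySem

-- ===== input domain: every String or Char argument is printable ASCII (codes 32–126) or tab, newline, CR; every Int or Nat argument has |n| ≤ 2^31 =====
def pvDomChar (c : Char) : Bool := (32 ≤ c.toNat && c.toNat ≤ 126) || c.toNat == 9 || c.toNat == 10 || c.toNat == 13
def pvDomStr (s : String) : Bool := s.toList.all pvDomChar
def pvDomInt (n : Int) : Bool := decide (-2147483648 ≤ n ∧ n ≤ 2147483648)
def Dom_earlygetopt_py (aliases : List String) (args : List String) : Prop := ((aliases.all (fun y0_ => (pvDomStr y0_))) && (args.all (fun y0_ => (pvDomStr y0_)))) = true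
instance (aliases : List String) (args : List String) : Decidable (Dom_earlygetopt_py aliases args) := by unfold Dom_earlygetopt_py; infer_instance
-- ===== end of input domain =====

-- B replaces A's quadratic del/pop-in-place scan with one linear pass over the slice before "--";
-- A mutates args in place (B performs the same mutation in Python); the equivalence proved here is about the RETURN value only.


-- ===== PORT A =====
-- while-loop of A: state (args, values, argcount, pos); fuel bounds the iteration count
-- (each iteration strictly decreases argcount - pos, so argcount + 1 iterations always suffice).
def pvLoopA (aliases shortopts : List String) : Nat → List String → List String → Nat → Nat → List String
  | 0, _, values, _, _ => values
  | fuel + 1, args, values, argcount, pos =>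
    if pos < argcount then
      match PySem.List.pyGet? args (pos : Int) with
      | none => values      -- unreachable: pos < argcount ≤ len(args) throughout
      | some a =>
        if a ∈ aliases then
          if argcount ≤ pos + 1 then values   -- break
          else
            match PySem.List.pop? args (pos : Int) with   -- del args[pos]
            | none => values
            | some (_, args1) =>
              match PySem.List.pop? args1 (pos : Int) with  -- values.append(args.pop(pos))
              | none => values
              | some (v, args2) =>
                pvLoopA aliases shortopts fuel args2 (values ++ [v]) (argcount - 2) pos
        else if PySem.Str.slice a none (some 2) ∈ shortopts then
          match PySem.List.pop? args (pos : Int) with      -- values.append(args.pop(pos)[2:])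
          | none => values
          | some (v, args1) =>
            pvLoopA aliases shortopts fuel args1 (values ++ [PySem.Str.slice v (some 2) none]) (argcount - 1) pos
        else
          pvLoopA aliases shortopts fuel args values argcount (pos + 1)
    else values

def earlygetopt_py (aliases : List String) (args : List String) : List String :=
  let argcount : Nat := match PySem.List.index? args "--" with
    | some i => i
    | none => args.length
  let shortopts := aliases.filter (fun opt => PySem.Str.len opt == 2)
  pvLoopA aliases shortopts (argcount + 1) args [] argcount 0

-- ===== PORT B =====
-- single pass of B over head = args[:cut], returning (values, kept); only values is the return value.
def pvLoopB (aliasset shortopts : PySem.Set String) : List String → List String × List String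
  | [] => ([], [])
  | a :: rest =>
    if PySem.Set.contains aliasset a then
      match rest with
      | [] => ([], [a])     -- break: the trailing option stays in kept
      | v :: rest' =>
        let r := pvLoopB aliasset shortopts rest'
        (v :: r.1, r.2)
    else if PySem.Set.contains shortopts (PySem.Str.slice a none (some 2)) then
      let r := pvLoopB aliasset shortopts rest
      (PySem.Str.slice a (some 2) none :: r.1, r.2)
    else
      let r := pvLoopB aliasset shortopts rest
      (r.1, a :: r.2)

def earlygetopt_py_alt (aliases : List String) (args : List String) : List String :=
  let cut : Nat := (PySem.List.index? args "--").getD args.length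
  let aliasset := PySem.Set.ofList aliases
  let shortopts := PySem.Set.ofList (aliases.filter (fun opt => PySem.Str.len opt == 2))
  let head := args.take cut
  (pvLoopB aliasset shortopts head).1

-- ===== PRECONDITION & SPEC =====
def Spec_earlygetopt_py (aliases : List String) (args : List String) (out : List String) : Prop := out = earlygetopt_py_alt aliases args
instance (aliases : List String) (args : List String) (out : List String) : Decidable (Spec_earlygetopt_py aliases args out) := by unfold Spec_earlygetopt_py; infer_instance

-- ===== CLAIM (what is proved, stated in full; the proofs are below) =====
def Claim_equal_earlygetopt_py : Prop := ∀ (aliases : List String) (args : List String), Dom_earlygetopt_py aliases args → Spec_earlygetopt_py aliases args (earlygetopt_py aliases args)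

-- ===== LEMMAS AND PROOFS =====

-- A's loop on args = kept ++ rem ++ tail with pos = |kept| and argcount = |kept| + |rem| equals B's pass over rem.
theorem pv_pyGet_mid (kept l : List String) (a : String) :
    PySem.List.pyGet? (kept ++ a :: l) (kept.length : Int) = some a := by
  simp

theorem pv_pop_mid (kept l : List String) (a : String) :
    PySem.List.pop? (kept ++ a :: l) (kept.length : Int) = some (a, kept ++ l) := by
  rw [PySem.List.pop?_natCast _ _ (by simp)]
  simp [List.eraseIdx_append_of_length_le, List.getElem_append_right]

theorem pvLoopA_eq (aliases shortopts tail : List String) :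
    ∀ (fuel : Nat) (rem kept values : List String), rem.length ≤ fuel →
    pvLoopA aliases shortopts fuel (kept ++ rem ++ tail) values (kept.length + rem.length) kept.length
      = values ++ (pvLoopB (PySem.Set.ofList aliases) (PySem.Set.ofList shortopts) rem).1 := by
  intro fuel
  induction fuel with
  | zero =>
    intro rem kept values h
    have : rem = [] := List.length_eq_zero_iff.mp (Nat.le_zero.mp h)
    subst this
    simp [pvLoopA, pvLoopB]
  | succ fuel ih =>
    intro rem kept values h
    match rem with
    | [] => simp [pvLoopA, pvLoopB]
    | a :: rem' =>
      unfold pvLoopA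
      rw [show kept ++ (a :: rem') ++ tail = kept ++ a :: (rem' ++ tail) by simp,
        if_pos (by simp)]
      simp only [pv_pyGet_mid, List.length_cons]
      by_cases ha : a ∈ aliases
      · rw [if_pos ha]
        match rem' with
        | [] =>
          rw [if_pos (by simp)]
          simp [pvLoopB, ha]
        | v :: rem'' =>
          rw [if_neg (by simp only [List.length_cons]; omega)]
          simp only [pv_pop_mid, List.cons_append, List.length_cons]
          rw [show kept ++ (rem'' ++ tail) = kept ++ rem'' ++ tail by simp,
            show kept.length + (rem''.length + 1 + 1) - 2 = kept.length + rem''.length by omega,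
            ih rem'' kept (values ++ [v]) (by simp only [List.length_cons] at h; omega)]
          simp [pvLoopB, ha]
      · rw [if_neg ha]
        by_cases hs : PySem.Str.slice a none (some 2) ∈ shortopts
        · rw [if_pos hs]
          simp only [pv_pop_mid]
          rw [show kept ++ (rem' ++ tail) = kept ++ rem' ++ tail by simp,
            show kept.length + (rem'.length + 1) - 1 = kept.length + rem'.length by omega,
            ih rem' kept _ (by simp only [List.length_cons] at h; omega)]
          cases rem' <;> simp [pvLoopB, ha, hs]
        · rw [if_neg hs]
          rw [show kept ++ a :: (rem' ++ tail) = (kept ++ [a]) ++ rem' ++ tail by simp,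
            show kept.length + (rem'.length + 1) = (kept ++ [a]).length + rem'.length by simp; omega,
            show kept.length + 1 = (kept ++ [a]).length by simp,
            ih rem' (kept ++ [a]) values (by simp only [List.length_cons] at h; omega)]
          cases rem' <;> simp [pvLoopB, ha, hs]
theorem pv_main (aliases args : List String) : earlygetopt_py aliases args = earlygetopt_py_alt aliases args := by
  unfold earlygetopt_py earlygetopt_py_alt
  cases hidx : PySem.List.index? args "--" with
  | none =>
    simp only [Option.getD_none]
    have := pvLoopA_eq aliases (aliases.filter (fun opt => PySem.Str.len opt == 2)) []
      (args.length + 1) args [] [] (by omega)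
    simpa using this
  | some i =>
    obtain ⟨pre, suf, hargs, hlen, -⟩ := (PySem.List.index?_eq_some_iff args "--" i).mp hidx
    simp only [Option.getD_some]
    have htake : args.take i = pre := by rw [hargs, ← hlen]; exact List.take_left
    have key := pvLoopA_eq aliases (aliases.filter (fun opt => PySem.Str.len opt == 2))
      ("--" :: suf) (i + 1) pre [] [] (by omega)
    rw [hargs, htake] at *
    simpa [← hlen] using key

-- ===== VERDICT (by name: the statement is the Claim_ definition above) =====
theorem earlygetopt_py_spec : Claim_equal_earlygetopt_py := by
  intro aliases args _
  unfold Spec_earlygetopt_py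
  exact pv_main aliases args
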